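-- pv_equiv track=rewrite | github.com/posl/comment_recommendation | script/split_gen/3_time/zh/145_D/4.py | solve
-- ===== SOURCE A (Python) =====
-- def solve(x, y):
--     dp = [[0] * (y + 1) for i in range(x + 1)]
--     dp[0][0] = 1
--     for i in range(x + 1):
--         for j in range(y + 1):
--             if i + 1 <= x and j + 2 <= y:
--                 dp[i + 1][j + 2] = (dp[i + 1][j + 2] + dp[i][j]) % (10 ** 9 + 7)
--             if i + 2 <= x and j + 1 <= y:
--                 dp[i + 2][j + 1] = (dp[i + 2][j + 1] + dp[i][j]) % (10 ** 9 + 7)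
--     return dp[x][y]
-- ===== SOURCE B (Python) =====
-- def solve(x, y):
--     # Closed form: a steps of (1,2) and b steps of (2,1) reach (x,y) iff
--     # a = (2*y - x)/3 and b = (2*x - y)/3 are nonnegative integers; the
--     # number of orderings is C(a+b, a), taken mod 10**9+7.
--     a3 = 2 * y - x
--     b3 = 2 * x - y
--     if a3 % 3 != 0 or a3 < 0 or b3 < 0:
--         return 0
--     a = a3 // 3
--     b = b3 // 3
--     c = 1
--     for i in range(1, a + 1):
--         c = c * (b + i) // i
--     return c % (10 ** 9 + 7)
-- ===== Notes on version B (the rewrite author's own statement) =====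
-- stated objective: faster
-- what changed: Replaces the O(x*y) 2-D push DP table by the closed form: solve the linear system for the step counts a=(2y-x)/3, b=(2x-y)/3 and return C(a+b,a) mod 1e9+7 computed by a single multiplicative loop of length a.
import Mathlib
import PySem

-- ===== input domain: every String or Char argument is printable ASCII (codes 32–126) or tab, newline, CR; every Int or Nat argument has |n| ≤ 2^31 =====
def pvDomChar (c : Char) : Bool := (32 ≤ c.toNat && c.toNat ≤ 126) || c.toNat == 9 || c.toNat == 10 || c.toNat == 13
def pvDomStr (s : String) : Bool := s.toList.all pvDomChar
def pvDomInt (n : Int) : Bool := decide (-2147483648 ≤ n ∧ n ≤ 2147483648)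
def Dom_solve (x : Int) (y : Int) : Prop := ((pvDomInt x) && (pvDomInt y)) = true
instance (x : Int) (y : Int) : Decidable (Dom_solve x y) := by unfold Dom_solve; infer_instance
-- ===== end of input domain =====

-- B replaces A's O(x*y) 2-D DP table by the closed form C(a+b,a) mod 1e9+7 for the
-- step counts a=(2y-x)/3, b=(2x-y)/3 (objective: faster).

-- ===== PORT A =====
-- dp[i][j] read / dp[i][j] = v, total forms: in every path executed under
-- Pre_solve the indices are in range (out-of-range accesses of the Python raise
-- and are excluded by Pre_solve).
def pvGet2 (dp : List (List Int)) (i j : Int) : Int :=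
  PySem.List.pyGetD (PySem.List.pyGetD dp i []) j 0

def pvSet2 (dp : List (List Int)) (i j : Int) (v : Int) : List (List Int) :=
  PySem.List.pySetD dp i (PySem.List.pySetD (PySem.List.pyGetD dp i []) j v)

def solve (x : Int) (y : Int) : Int :=
  let dp0 : List (List Int) :=
    (PySem.List.pyRange 0 (x+1) 1).map (fun _ => PySem.List.pyRepeat [(0:Int)] (y+1))
  let dp1 := pvSet2 dp0 0 0 1
  let dp2 := (PySem.List.pyRange 0 (x+1) 1).foldl (fun dp i =>
    (PySem.List.pyRange 0 (y+1) 1).foldl (fun dp j =>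
      let dp := if i+1 ≤ x ∧ j+2 ≤ y then
          pvSet2 dp (i+1) (j+2)
            (PySem.Int.mod (pvGet2 dp (i+1) (j+2) + pvGet2 dp i j) (10^9+7))
        else dp
      if i+2 ≤ x ∧ j+1 ≤ y then
          pvSet2 dp (i+2) (j+1)
            (PySem.Int.mod (pvGet2 dp (i+2) (j+1) + pvGet2 dp i j) (10^9+7))
        else dp) dp) dp1
  pvGet2 dp2 x y

-- ===== PORT B =====
def solve_alt (x : Int) (y : Int) : Int :=
  let a3 := 2*y - x
  let b3 := 2*x - y
  if PySem.Int.mod a3 3 ≠ 0 ∨ a3 < 0 ∨ b3 < 0 then 0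
  else
    let a := PySem.Int.floordiv a3 3
    let b := PySem.Int.floordiv b3 3
    let c := (PySem.List.pyRange 1 (a+1) 1).foldl
      (fun c i => PySem.Int.floordiv (c * (b + i)) i) 1
    PySem.Int.mod c (10^9+7)

-- ===== PRECONDITION & SPEC =====
-- Pre_solve: the Python A raises IndexError (dp[0][0] on an empty table) iff x < 0 or y < 0.
def Pre_solve (x : Int) (y : Int) : Prop := 0 ≤ x ∧ 0 ≤ y
instance (x : Int) (y : Int) : Decidable (Pre_solve x y) := by unfold Pre_solve; infer_instance
def pvWitness_solve : Int × Int := (3, 3)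

def Spec_solve (x : Int) (y : Int) (out : Int) : Prop := out = solve_alt x y
instance (x : Int) (y : Int) (out : Int) : Decidable (Spec_solve x y out) := by unfold Spec_solve; infer_instance

-- ===== CLAIM (what is proved, stated in full; the proofs are below) =====
def Claim_equal_solve : Prop := ∀ (x : Int) (y : Int), Dom_solve x y → Pre_solve x y → Spec_solve x y (solve x y)

-- ===== LEMMAS AND PROOFS =====

-- the value (mod 1e9+7) A's DP stores in its finished cell (p,q)
def pvF (p q : Nat) : Int :=
  ((if p = 0 ∧ q = 0 then (1:Int) else 0) +
   (if _h : 1 ≤ p ∧ 2 ≤ q then pvF (p-1) (q-2) else 0) +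
   (if _h : 2 ≤ p ∧ 1 ≤ q then pvF (p-2) (q-1) else 0)) % 1000000007
termination_by p + q
decreasing_by all_goals omega

-- the closed form B computes
def pvClosed (p q : Nat) : Int :=
  if (p + q) % 3 = 0 ∧ p ≤ 2*q ∧ q ≤ 2*p
  then ((Nat.choose ((p+q)/3) ((2*q-p)/3) : Nat) : Int) % 1000000007
  else 0

-- partial cell value in A's row-major scan: outer index i, inner index j
def pvVal (i j p q : Nat) : Int :=
  ((if p = 0 ∧ q = 0 then (1:Int) else 0) +
   (if 1 ≤ p ∧ 2 ≤ q ∧ (p-1 < i ∨ (p-1 = i ∧ q-2 < j)) then pvF (p-1) (q-2) else 0) +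
   (if 2 ≤ p ∧ 1 ≤ q ∧ (p-2 < i ∨ (p-2 = i ∧ q-1 < j)) then pvF (p-2) (q-1) else 0)) % 1000000007

def pvGrid (n m : Nat) (f : Nat → Nat → Int) : List (List Int) :=
  (List.range n).map (fun p => (List.range m).map (fun q => f p q))

theorem pvGrid_get (n m : Nat) (f : Nat → Nat → Int) (p q : Nat)
    (hp : p < n) (hq : q < m) : pvGet2 (pvGrid n m f) (p:Int) (q:Int) = f p q := by
  simp [pvGet2, pvGrid, PySem.List.pyGetD_natCast, List.getD_eq_getElem?_getD, hp, hq]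

theorem pvGrid_set (n m : Nat) (f : Nat → Nat → Int) (p q : Nat) (v : Int)
    (hp : p < n) (_hq : q < m) :
    pvSet2 (pvGrid n m f) (p:Int) (q:Int) v
      = pvGrid n m (fun p' q' => if p' = p ∧ q' = q then v else f p' q') := by
  unfold pvSet2 pvGrid
  simp only [PySem.List.pySetD_natCast, PySem.List.pyGetD_natCast]
  have hrow : ((List.range n).map (fun p => (List.range m).map (fun q => f p q))).getD p []
      = (List.range m).map (fun q => f p q) := by
    simp [List.getD_eq_getElem?_getD, hp]
  rw [hrow]
  apply List.ext_getElem
  · simp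
  · intro i h1 h2
    simp only [List.length_map, List.length_range] at h1 h2
    rw [List.getElem_set]
    by_cases hip : p = i
    · subst hip
      simp only [if_true]
      rw [List.getElem_map, List.getElem_range]
      apply List.ext_getElem
      · simp
      · intro j j1 j2
        simp only [List.length_map, List.length_range] at j1 j2
        rw [List.getElem_set]
        by_cases hjq : q = j
        · subst hjq
          simp
        · simp only [List.getElem_map, List.getElem_range]
          rw [if_neg hjq, if_neg (by tauto)]
    · rw [if_neg hip]
      simp only [List.getElem_map, List.getElem_range]
      apply List.map_congr_left
      intro j _
      rw [if_neg (by tauto)]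

theorem pvGrid_congr (n m : Nat) (f g : Nat → Nat → Int)
    (h : ∀ p, p < n → ∀ q, q < m → f p q = g p q) : pvGrid n m f = pvGrid n m g := by
  unfold pvGrid
  refine List.map_congr_left ?_
  intro p hp
  refine List.map_congr_left ?_
  intro q hq
  exact h p (List.mem_range.mp hp) q (List.mem_range.mp hq)

theorem pvClosed_of (p q a b : Nat) (h1 : p = a + 2*b) (h2 : q = 2*a + b) :
    pvClosed p q = ((Nat.choose (a+b) a : Nat) : Int) % 1000000007 := by
  unfold pvClosed
  rw [if_pos (by omega : (p+q) % 3 = 0 ∧ p ≤ 2*q ∧ q ≤ 2*p)]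
  rw [(by omega : (p+q)/3 = a+b), (by omega : (2*q-p)/3 = a)]

theorem pvClosed_eq_zero (p q : Nat) (h : ¬ ((p+q) % 3 = 0 ∧ p ≤ 2*q ∧ q ≤ 2*p)) :
    pvClosed p q = 0 := by
  unfold pvClosed
  rw [if_neg h]

theorem pvF_eq_closed (p q : Nat) : pvF p q = pvClosed p q := by
  induction p, q using pvF.induct with
  | _ p q ih1 ih2 =>
    rw [pvF]
    by_cases hrep : (p+q) % 3 = 0 ∧ p ≤ 2*q ∧ q ≤ 2*p
    · obtain ⟨a, b, ha, hb⟩ : ∃ a b, p = a + 2*b ∧ q = 2*a + b :=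
        ⟨(2*q-p)/3, (2*p-q)/3, by omega, by omega⟩
      rw [pvClosed_of p q a b ha hb]
      rcases Nat.eq_zero_or_pos a with ha0 | ha1 <;> rcases Nat.eq_zero_or_pos b with hb0 | hb1
      · -- a = 0, b = 0 : origin
        have hp0 : p = 0 := by omega
        have hq0 : q = 0 := by omega
        subst hp0; subst hq0; subst ha0; subst hb0
        norm_num
      · -- a = 0, b ≥ 1 : only the (2,1)-predecessor exists
        have t1 : (if _h : 1 ≤ p ∧ 2 ≤ q then pvF (p-1) (q-2) else 0) = 0 := by
          split_ifs with h
          · rw [ih1 h, pvClosed_eq_zero]; omega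
          · rfl
        have t2c : 2 ≤ p ∧ 1 ≤ q := by omega
        rw [t1, dif_pos t2c, ih2 t2c, pvClosed_of (p-2) (q-1) 0 (b-1) (by omega) (by omega)]
        rw [if_neg (by omega : ¬ (p = 0 ∧ q = 0))]
        subst ha0
        simp only [Nat.choose_zero_right, Nat.zero_add]
        norm_num
      · -- a ≥ 1, b = 0 : only the (1,2)-predecessor exists
        have t2 : (if _h : 2 ≤ p ∧ 1 ≤ q then pvF (p-2) (q-1) else 0) = 0 := by
          split_ifs with h
          · rw [ih2 h, pvClosed_eq_zero]; omega
          · rfl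
        have t1c : 1 ≤ p ∧ 2 ≤ q := by omega
        rw [t2, dif_pos t1c, ih1 t1c, pvClosed_of (p-1) (q-2) (a-1) 0 (by omega) (by omega)]
        rw [if_neg (by omega : ¬ (p = 0 ∧ q = 0))]
        subst hb0
        simp only [Nat.add_zero, Nat.choose_self]
        norm_num
      · -- a ≥ 1, b ≥ 1 : Pascal
        obtain ⟨a', rfl⟩ : ∃ a', a = a'+1 := ⟨a-1, by omega⟩
        obtain ⟨b', rfl⟩ : ∃ b', b = b'+1 := ⟨b-1, by omega⟩
        have t1c : 1 ≤ p ∧ 2 ≤ q := by omega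
        have t2c : 2 ≤ p ∧ 1 ≤ q := by omega
        rw [dif_pos t1c, dif_pos t2c, ih1 t1c, ih2 t2c,
            pvClosed_of (p-1) (q-2) a' (b'+1) (by omega) (by omega),
            pvClosed_of (p-2) (q-1) (a'+1) b' (by omega) (by omega),
            if_neg (by omega : ¬ (p = 0 ∧ q = 0))]
        have hch : (a'+(b'+1)).choose a' + ((a'+1)+b').choose (a'+1)
            = ((a'+1)+(b'+1)).choose (a'+1) := by
          have := Nat.choose_succ_succ (a'+b'+1) a'
          simp only [Nat.succ_eq_add_one] at this
          rw [(by omega : a'+(b'+1) = a'+b'+1), (by omega : (a'+1)+b' = a'+b'+1),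
              (by omega : (a'+1)+(b'+1) = a'+b'+1+1)]
          omega
        rw [Int.zero_add, ← Int.add_emod, ← Int.natCast_add, hch]
    · have t1 : (if _h : 1 ≤ p ∧ 2 ≤ q then pvF (p-1) (q-2) else 0) = 0 := by
        split_ifs with h
        · rw [ih1 h, pvClosed_eq_zero]; omega
        · rfl
      have t2 : (if _h : 2 ≤ p ∧ 1 ≤ q then pvF (p-2) (q-1) else 0) = 0 := by
        split_ifs with h
        · rw [ih2 h, pvClosed_eq_zero]; omega
        · rfl
      rw [t1, t2, if_neg (by omega : ¬ (p = 0 ∧ q = 0)), pvClosed_eq_zero p q hrep]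
      norm_num

-- the per-cell body of A's inner loop
def pvBody (x y : Int) (dp : List (List Int)) (i j : Int) : List (List Int) :=
  let dp := if i+1 ≤ x ∧ j+2 ≤ y then
      pvSet2 dp (i+1) (j+2)
        (PySem.Int.mod (pvGet2 dp (i+1) (j+2) + pvGet2 dp i j) (10^9+7))
    else dp
  if i+2 ≤ x ∧ j+1 ≤ y then
      pvSet2 dp (i+2) (j+1)
        (PySem.Int.mod (pvGet2 dp (i+2) (j+1) + pvGet2 dp i j) (10^9+7))
    else dp

theorem pvModK (a : Int) : PySem.Int.mod a (10^9+7) = a % 1000000007 := by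
  rw [PySem.Int.mod_eq_emod_of_pos (by norm_num)]; norm_num

theorem pvVal_succ (i j p q : Nat) :
    pvVal i (j+1) p q =
      if (p = i+1 ∧ q = j+2) ∨ (p = i+2 ∧ q = j+1) then
        (pvVal i j p q + pvF i j) % 1000000007
      else pvVal i j p q := by
  by_cases h1 : p = i+1 ∧ q = j+2
  · obtain ⟨rfl, rfl⟩ := h1
    rw [if_pos (Or.inl ⟨rfl, rfl⟩)]
    unfold pvVal
    rw [if_neg (by omega : ¬ (i+1 = 0 ∧ j+2 = 0)),
        if_pos (by omega : 1 ≤ i+1 ∧ 2 ≤ j+2 ∧ (i+1-1 < i ∨ (i+1-1 = i ∧ j+2-2 < j+1))),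
        if_neg (by omega : ¬ (1 ≤ i+1 ∧ 2 ≤ j+2 ∧ (i+1-1 < i ∨ (i+1-1 = i ∧ j+2-2 < j)))),
        (by omega : i+1-1 = i), (by omega : j+2-2 = j),
        if_congr (by omega : (2 ≤ i+1 ∧ 1 ≤ j+2 ∧ (i+1-2 < i ∨ (i+1-2 = i ∧ j+2-1 < j+1)))
          ↔ (2 ≤ i+1 ∧ 1 ≤ j+2 ∧ (i+1-2 < i ∨ (i+1-2 = i ∧ j+2-1 < j)))) rfl rfl]
    generalize pvF i j = F
    generalize (if 2 ≤ i+1 ∧ 1 ≤ j+2 ∧ (i+1-2 < i ∨ (i+1-2 = i ∧ j+2-1 < j)) then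
      pvF (i+1-2) (j+2-1) else 0) = T
    omega
  · by_cases h2 : p = i+2 ∧ q = j+1
    · obtain ⟨rfl, rfl⟩ := h2
      rw [if_pos (Or.inr ⟨rfl, rfl⟩)]
      unfold pvVal
      rw [if_neg (by omega : ¬ (i+2 = 0 ∧ j+1 = 0)),
          if_pos (by omega : 2 ≤ i+2 ∧ 1 ≤ j+1 ∧ (i+2-2 < i ∨ (i+2-2 = i ∧ j+1-1 < j+1))),
          if_neg (by omega : ¬ (2 ≤ i+2 ∧ 1 ≤ j+1 ∧ (i+2-2 < i ∨ (i+2-2 = i ∧ j+1-1 < j)))),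
          (by omega : i+2-2 = i), (by omega : j+1-1 = j),
          if_congr (by omega : (1 ≤ i+2 ∧ 2 ≤ j+1 ∧ (i+2-1 < i ∨ (i+2-1 = i ∧ j+1-2 < j+1)))
            ↔ (1 ≤ i+2 ∧ 2 ≤ j+1 ∧ (i+2-1 < i ∨ (i+2-1 = i ∧ j+1-2 < j)))) rfl rfl]
      generalize pvF i j = F
      generalize (if 1 ≤ i+2 ∧ 2 ≤ j+1 ∧ (i+2-1 < i ∨ (i+2-1 = i ∧ j+1-2 < j)) then
        pvF (i+2-1) (j+1-2) else 0) = T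
      omega
    · rw [if_neg (by tauto)]
      unfold pvVal
      rw [if_congr (by omega : (1 ≤ p ∧ 2 ≤ q ∧ (p-1 < i ∨ (p-1 = i ∧ q-2 < j+1)))
            ↔ (1 ≤ p ∧ 2 ≤ q ∧ (p-1 < i ∨ (p-1 = i ∧ q-2 < j)))) rfl rfl,
          if_congr (by omega : (2 ≤ p ∧ 1 ≤ q ∧ (p-2 < i ∨ (p-2 = i ∧ q-1 < j+1)))
            ↔ (2 ≤ p ∧ 1 ≤ q ∧ (p-2 < i ∨ (p-2 = i ∧ q-1 < j)))) rfl rfl]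

theorem pvVal_eq_F (i j p q : Nat) (h : p ≤ i) : pvVal i j p q = pvF p q := by
  rw [pvF]
  unfold pvVal
  rw [if_congr (by omega : (1 ≤ p ∧ 2 ≤ q ∧ (p-1 < i ∨ (p-1 = i ∧ q-2 < j)))
        ↔ (1 ≤ p ∧ 2 ≤ q)) rfl rfl,
      if_congr (by omega : (2 ≤ p ∧ 1 ≤ q ∧ (p-2 < i ∨ (p-2 = i ∧ q-1 < j)))
        ↔ (2 ≤ p ∧ 1 ≤ q)) rfl rfl]
  simp only [dite_eq_ite]

theorem pvStep (x y : Int) (n m : Nat) (hn : (n:Int) = x+1) (hm : (m:Int) = y+1)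
    (i j : Nat) (hi : i < n) (hj : j < m) :
    pvBody x y (pvGrid n m (pvVal i j)) (i:Int) (j:Int) = pvGrid n m (pvVal i (j+1)) := by
  have e1 : (i:Int)+1 = ((i+1:Nat):Int) := by push_cast; ring
  have e2 : (i:Int)+2 = ((i+2:Nat):Int) := by push_cast; ring
  have e3 : (j:Int)+1 = ((j+1:Nat):Int) := by push_cast; ring
  have e4 : (j:Int)+2 = ((j+2:Nat):Int) := by push_cast; ring
  have hg1 : ((i:Int)+1 ≤ x ∧ (j:Int)+2 ≤ y) ↔ (i+1 < n ∧ j+2 < m) := by omega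
  have hg2 : ((i:Int)+2 ≤ x ∧ (j:Int)+1 ≤ y) ↔ (i+2 < n ∧ j+1 < m) := by omega
  simp only [pvBody, pvModK]
  by_cases g1 : i+1 < n ∧ j+2 < m <;> by_cases g2 : i+2 < n ∧ j+1 < m
  · rw [if_pos (hg1.mpr g1), if_pos (hg2.mpr g2), e1, e2, e3, e4,
        pvGrid_get n m _ (i+1) (j+2) g1.1 g1.2, pvGrid_get n m _ i j hi hj,
        pvGrid_set n m _ (i+1) (j+2) _ g1.1 g1.2,
        pvGrid_get n m _ (i+2) (j+1) g2.1 g2.2, pvGrid_get n m _ i j hi hj,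
        if_neg (by omega : ¬ (i+2 = i+1 ∧ j+1 = j+2)),
        if_neg (by omega : ¬ (i = i+1 ∧ j = j+2)),
        pvGrid_set n m _ (i+2) (j+1) _ g2.1 g2.2]
    apply pvGrid_congr
    intro p hp q hq
    rw [pvVal_succ, pvVal_eq_F i j i j le_rfl]
    by_cases P2 : p = i+2 ∧ q = j+1
    · obtain ⟨rfl, rfl⟩ := P2
      rw [if_pos ⟨rfl, rfl⟩, if_pos (Or.inr ⟨rfl, rfl⟩)]
    · rw [if_neg P2]
      by_cases P1 : p = i+1 ∧ q = j+2
      · obtain ⟨rfl, rfl⟩ := P1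
        rw [if_pos ⟨rfl, rfl⟩, if_pos (Or.inl ⟨rfl, rfl⟩)]
      · rw [if_neg P1, if_neg (by tauto)]
  · rw [if_pos (hg1.mpr g1), if_neg (fun h => g2 (hg2.mp h)), e1, e4,
        pvGrid_get n m _ (i+1) (j+2) g1.1 g1.2, pvGrid_get n m _ i j hi hj,
        pvGrid_set n m _ (i+1) (j+2) _ g1.1 g1.2]
    apply pvGrid_congr
    intro p hp q hq
    rw [pvVal_succ, pvVal_eq_F i j i j le_rfl]
    by_cases P1 : p = i+1 ∧ q = j+2
    · obtain ⟨rfl, rfl⟩ := P1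
      rw [if_pos ⟨rfl, rfl⟩, if_pos (Or.inl ⟨rfl, rfl⟩)]
    · rw [if_neg P1, if_neg (by rintro (h | h); exact P1 h; omega)]
  · rw [if_neg (fun h => g1 (hg1.mp h)), if_pos (hg2.mpr g2), e2, e3,
        pvGrid_get n m _ (i+2) (j+1) g2.1 g2.2, pvGrid_get n m _ i j hi hj,
        pvGrid_set n m _ (i+2) (j+1) _ g2.1 g2.2]
    apply pvGrid_congr
    intro p hp q hq
    rw [pvVal_succ, pvVal_eq_F i j i j le_rfl]
    by_cases P2 : p = i+2 ∧ q = j+1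
    · obtain ⟨rfl, rfl⟩ := P2
      rw [if_pos ⟨rfl, rfl⟩, if_pos (Or.inr ⟨rfl, rfl⟩)]
    · rw [if_neg P2, if_neg (by rintro (h | h); omega; exact P2 h)]
  · rw [if_neg (fun h => g1 (hg1.mp h)), if_neg (fun h => g2 (hg2.mp h))]
    apply pvGrid_congr
    intro p hp q hq
    rw [pvVal_succ, if_neg (by omega)]

theorem pvInner (x y : Int) (n m : Nat) (hn : (n:Int) = x+1) (hm : (m:Int) = y+1)
    (i : Nat) (hi : i < n) :
    ∀ j, j ≤ m → (List.range j).foldl (fun dp (jj : Nat) => pvBody x y dp (i:Int) (jj:Int))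
      (pvGrid n m (pvVal i 0)) = pvGrid n m (pvVal i j) := by
  intro j
  induction j with
  | zero => intro _; rfl
  | succ j ih =>
    intro hjm
    rw [List.range_succ, List.foldl_append, ih (by omega), List.foldl_cons, List.foldl_nil,
        pvStep x y n m hn hm i j hi (by omega)]

theorem pvRow (n m : Nat) (i : Nat) :
    pvGrid n m (pvVal i m) = pvGrid n m (pvVal (i+1) 0) := by
  apply pvGrid_congr
  intro p hp q hq
  unfold pvVal
  rw [if_congr (by omega : (1 ≤ p ∧ 2 ≤ q ∧ (p-1 < i ∨ (p-1 = i ∧ q-2 < m)))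
        ↔ (1 ≤ p ∧ 2 ≤ q ∧ (p-1 < i+1 ∨ (p-1 = i+1 ∧ q-2 < 0)))) rfl rfl,
      if_congr (by omega : (2 ≤ p ∧ 1 ≤ q ∧ (p-2 < i ∨ (p-2 = i ∧ q-1 < m)))
        ↔ (2 ≤ p ∧ 1 ≤ q ∧ (p-2 < i+1 ∨ (p-2 = i+1 ∧ q-1 < 0)))) rfl rfl]

theorem pvInit (x y : Int) (hx : 0 ≤ x) (hy : 0 ≤ y) (n m : Nat) (hn : (n:Int) = x+1) (hm : (m:Int) = y+1) :
    pvSet2 ((PySem.List.pyRange 0 (x+1) 1).map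
        (fun _ => PySem.List.pyRepeat [(0:Int)] (y+1))) 0 0 1
      = pvGrid n m (pvVal 0 0) := by
  have h0 : (PySem.List.pyRange 0 (x+1) 1).map
      (fun _ => PySem.List.pyRepeat [(0:Int)] (y+1)) = pvGrid n m (fun _ _ => (0:Int)) := by
    rw [PySem.List.pyRange_one, PySem.List.pyRepeat_singleton]
    unfold pvGrid
    simp only [List.map_map, Function.comp_def, List.map_const', List.length_range]
    rw [(by omega : (x+1-0).toNat = n), (by omega : (y+1).toNat = m)]
  rw [h0]
  have hset := pvGrid_set n m (fun _ _ => (0:Int)) 0 0 1 (by omega) (by omega)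
  simp only [Nat.cast_zero] at hset
  rw [hset]
  apply pvGrid_congr
  intro p hp q hq
  unfold pvVal
  rw [if_neg (by omega : ¬ (1 ≤ p ∧ 2 ≤ q ∧ (p-1 < 0 ∨ (p-1 = 0 ∧ q-2 < 0)))),
      if_neg (by omega : ¬ (2 ≤ p ∧ 1 ≤ q ∧ (p-2 < 0 ∨ (p-2 = 0 ∧ q-1 < 0))))]
  by_cases h : p = 0 ∧ q = 0
  · rw [if_pos h]; norm_num
  · rw [if_neg h]; norm_num

theorem pvOuter (x y : Int) (n m : Nat) (hn : (n:Int) = x+1) (hm : (m:Int) = y+1) :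
    ∀ i, i ≤ n → (List.range i).foldl (fun dp (ii : Nat) =>
        (List.range m).foldl (fun dp (jj : Nat) => pvBody x y dp (ii:Int) (jj:Int)) dp)
      (pvGrid n m (pvVal 0 0)) = pvGrid n m (pvVal i 0) := by
  intro i
  induction i with
  | zero => intro _; rfl
  | succ i ih =>
    intro hin
    rw [List.range_succ, List.foldl_append, ih (by omega), List.foldl_cons, List.foldl_nil,
        pvInner x y n m hn hm i (by omega) m le_rfl, pvRow]

theorem pvSolve_eq_F (x y : Int) (hx : 0 ≤ x) (hy : 0 ≤ y) :
    solve x y = pvF x.toNat y.toNat := by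
  have hn : ((x+1).toNat : Int) = x+1 := Int.toNat_of_nonneg (by omega)
  have hm : ((y+1).toNat : Int) = y+1 := Int.toNat_of_nonneg (by omega)
  set n := (x+1).toNat with hndef
  set m := (y+1).toNat with hmdef
  have hsolve : solve x y = pvGet2 ((List.range n).foldl (fun dp (ii : Nat) =>
      (List.range m).foldl (fun dp (jj : Nat) => pvBody x y dp (ii:Int) (jj:Int)) dp)
      (pvGrid n m (pvVal 0 0))) x y := by
    simp only [solve]
    rw [← pvInit x y hx hy n m hn hm]
    simp only [pvBody, PySem.List.pyRange_one, List.foldl_map, zero_add, sub_zero]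
    rfl
  rw [hsolve, pvOuter x y n m hn hm n le_rfl]
  rw [(by omega : x = ((n-1 : Nat) : Int)), (by omega : y = ((m-1 : Nat) : Int)),
      pvGrid_get n m _ (n-1) (m-1) (by omega) (by omega),
      pvVal_eq_F n 0 (n-1) (m-1) (by omega)]
  simp only [Int.toNat_natCast]

theorem pvLoop (B : Nat) : ∀ A : Nat,
    (PySem.List.pyRange 1 ((A:Int)+1) 1).foldl
      (fun c i => PySem.Int.floordiv (c * ((B:Int) + i)) i) 1
    = ((Nat.choose (B+A) A : Nat) : Int) := by
  intro A
  induction A with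
  | zero =>
    rw [PySem.List.pyRange_one_eq_nil (by norm_num)]
    simp
  | succ A ih =>
    have hcast : (((A+1:Nat) : Int) + 1) = ((A:Int) + 1) + 1 := by push_cast; ring
    rw [hcast, PySem.List.pyRange_one_succ_right (by omega), List.foldl_append, ih]
    simp only [List.foldl_cons, List.foldl_nil]
    have key : (B+A).choose A * (B+A+1) / (A+1) = (B+(A+1)).choose (A+1) := by
      have h := Nat.add_one_mul_choose_eq (B+A) A
      rw [Nat.mul_comm ((B+A).choose A) (B+A+1), h,
          (by omega : B+(A+1) = B+A+1), Nat.mul_div_cancel _ (by omega : 0 < A+1)]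
    have harg : ((Nat.choose (B+A) A : Nat) : Int) * ((B:Int) + ((A:Int)+1))
        = (((B+A).choose A * (B+A+1) : Nat) : Int) := by push_cast; ring
    rw [harg, PySem.Int.floordiv_eq_ediv_of_pos (by omega : (0:Int) < (A:Int)+1),
        (by push_cast; ring : ((A:Int)+1) = ((A+1 : Nat) : Int)), ← Int.natCast_div, key]

theorem pvSolveAlt_eq_closed (x y : Int) (hx : 0 ≤ x) (hy : 0 ≤ y) :
    solve_alt x y = pvClosed x.toNat y.toNat := by
  have hpx : ((x.toNat : Int)) = x := Int.toNat_of_nonneg hx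
  have hqy : ((y.toNat : Int)) = y := Int.toNat_of_nonneg hy
  set p := x.toNat
  set q := y.toNat
  have hiff : (PySem.Int.mod (2*y-x) 3 ≠ 0 ∨ 2*y-x < 0 ∨ 2*x-y < 0)
      ↔ ¬ ((p+q) % 3 = 0 ∧ p ≤ 2*q ∧ q ≤ 2*p) := by
    rw [Ne, PySem.Int.mod_eq_zero_iff_dvd]
    omega
  by_cases hrep : (p+q) % 3 = 0 ∧ p ≤ 2*q ∧ q ≤ 2*p
  · obtain ⟨A, B, hA, hB⟩ : ∃ A B : Nat, p = A + 2*B ∧ q = 2*A + B :=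
      ⟨(2*q-p)/3, (2*p-q)/3, by omega, by omega⟩
    have ea : PySem.Int.floordiv (2*y-x) 3 = (A:Int) := by
      rw [PySem.Int.floordiv_eq_ediv_of_pos (by norm_num)]; omega
    have eb : PySem.Int.floordiv (2*x-y) 3 = (B:Int) := by
      rw [PySem.Int.floordiv_eq_ediv_of_pos (by norm_num)]; omega
    simp only [solve_alt]
    rw [if_neg (fun h => (hiff.mp h) hrep), ea, eb, pvLoop B A,
        pvClosed_of p q A B hA hB,
        PySem.Int.mod_eq_emod_of_pos (by norm_num), Nat.add_comm A B]
    norm_num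
  · unfold solve_alt
    rw [if_pos (hiff.mpr hrep), pvClosed_eq_zero p q hrep]

-- ===== VERDICT (by name: the statement is the Claim_ definition above) =====
theorem solve_spec : Claim_equal_solve := by
  intro x y _ hpre
  unfold Spec_solve
  rw [pvSolve_eq_F x y hpre.1 hpre.2, pvSolveAlt_eq_closed x y hpre.1 hpre.2,
      pvF_eq_closed]
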